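-- pv_equiv track=rewrite | github.com/outtathe/tasya_kr | src/task2.py | task_2_var_1
-- ===== SOURCE A (Python) =====
-- def task_2_var_1(matrix):
--     """
--     Найдите сумму элементов столбца заданного массива, содержащего минимальный элемент.
--     """
--     min_value = float('inf')
--     min_index = -1
--     for row in matrix:
--         for j, value in enumerate(row):
--             if value < min_value:
--                 min_value = value
--                 min_index = j
--
--     column_sum = 0
--     for row in matrix:
--         column_sum += row[min_index]
--
--     return column_sum
-- ===== SOURCE B (Python) =====
-- def task_2_var_1(matrix):
--     """
--     Найдите сумму элементов столбца заданного массива, содержащего минимальный элемент.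
--     Single fused pass: accumulate per-column sums while tracking the best (minimal)
--     element seen so far together with its column; answer is that column's total.
--     """
--     col_sums = []
--     best = None  # (minimal value so far, its column)
--     for row in matrix:
--         for j, value in enumerate(row):
--             if j < len(col_sums):
--                 col_sums[j] += value
--             else:
--                 col_sums.append(value)
--             if best is None or value < best[0]:
--                 best = (value, j)
--     return col_sums[best[1]] if best else 0
-- ===== Notes on version B (the rewrite author's own statement) =====
-- stated objective: alternative
-- what changed: B makes one fused pass that accumulates every column's sum while tracking the running minimum and its column, then returns the accumulated sum of that column, instead of A's scan-for-minimum pass followed by a second indexing pass over all rows.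
import Mathlib
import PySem

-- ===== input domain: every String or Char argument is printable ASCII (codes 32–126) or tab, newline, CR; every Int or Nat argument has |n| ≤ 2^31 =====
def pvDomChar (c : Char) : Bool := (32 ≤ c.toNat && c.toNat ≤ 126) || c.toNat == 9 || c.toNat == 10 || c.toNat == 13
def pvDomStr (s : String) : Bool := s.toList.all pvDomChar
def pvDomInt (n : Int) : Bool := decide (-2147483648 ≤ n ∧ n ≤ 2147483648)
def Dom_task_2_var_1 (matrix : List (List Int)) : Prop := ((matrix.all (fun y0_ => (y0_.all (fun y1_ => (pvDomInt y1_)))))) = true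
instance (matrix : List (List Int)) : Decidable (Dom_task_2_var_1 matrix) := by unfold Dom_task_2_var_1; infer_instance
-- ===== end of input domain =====

-- B fuses A's two passes into one: it accumulates every column's sum while tracking the
-- running minimum and its column, then returns that column's accumulated sum (alternative
-- decomposition, same asymptotic cost).


-- ===== PORT A =====
-- 'if value < min_value' with min_value = float('inf') initially: every int is < inf,
-- so the state is (none, -1) until the first element and then always updates on strict <.
def pvAStep (s : Option Int × Int) (jv : Int × Int) : Option Int × Int :=
  match s.1 with
  | none => (some jv.2, jv.1)
  | some m => if jv.2 < m then (some jv.2, jv.1) else s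

def task_2_var_1 (matrix : List (List Int)) : Int :=
  let ms := matrix.foldl (fun s row => (PySem.List.enumerate row 0).foldl pvAStep s)
              ((none : Option Int), (-1 : Int))
  -- 'column_sum += row[min_index]': pyGetD is exact under Pre_ (the index is in range there)
  matrix.foldl (fun acc row => acc + PySem.List.pyGetD row ms.2 0) 0

-- ===== PORT B =====
-- state: (col_sums, best) with best = None | (min_value, min_index);
-- 'col_sums[j] += value' / 'col_sums.append(value)'; j from enumerate is ≥ 0, so .toNat is exact.
def pvBStep (s : List Int × Option (Int × Int)) (jv : Int × Int) : List Int × Option (Int × Int) :=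
  (if jv.1 < (s.1.length : Int) then s.1.modify jv.1.toNat (· + jv.2) else s.1 ++ [jv.2],
   match s.2 with
   | none => some (jv.2, jv.1)
   | some b => if jv.2 < b.1 then some (jv.2, jv.1) else s.2)

def task_2_var_1_alt (matrix : List (List Int)) : Int :=
  let s := matrix.foldl (fun s row => (PySem.List.enumerate row 0).foldl pvBStep s)
             (([] : List Int), (none : Option (Int × Int)))
  match s.2 with
  | none => 0
  | some b => (PySem.List.pyGet? s.1 b.2).getD 0

-- ===== PRECONDITION & SPEC =====
-- The column (in row-major first-occurrence order) of the minimal element of the matrix: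
-- the first row containing the minimum, and the first index of the minimum inside it.
def pvMinCol (matrix : List (List Int)) : Nat :=
  match matrix.flatten.min? with
  | none => 0
  | some m =>
    match matrix.find? (fun r => r.contains m) with
    | none => 0
    | some r => r.idxOf m

-- Pre_ excludes exactly the inputs where A raises IndexError: a nonempty matrix whose rows
-- are all empty (row[-1] on an empty row), or one with a row too short to hold the column
-- of the minimal element.
def Pre_task_2_var_1 (matrix : List (List Int)) : Prop :=
  matrix = [] ∨ (matrix.flatten ≠ [] ∧ ∀ row ∈ matrix, (pvMinCol matrix : Int) < row.length)
instance (matrix : List (List Int)) : Decidable (Pre_task_2_var_1 matrix) := by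
  unfold Pre_task_2_var_1; infer_instance

def pvWitness_task_2_var_1 : List (List Int) := [[3, 1], [4, 5]]

def Spec_task_2_var_1 (matrix : List (List Int)) (out : Int) : Prop := out = task_2_var_1_alt matrix
instance (matrix : List (List Int)) (out : Int) : Decidable (Spec_task_2_var_1 matrix out) := by
  unfold Spec_task_2_var_1; infer_instance

-- ===== CLAIM (what is proved, stated in full; the proofs are below) =====
def Claim_equal_task_2_var_1 : Prop := ∀ (matrix : List (List Int)), Dom_task_2_var_1 matrix → Pre_task_2_var_1 matrix → Spec_task_2_var_1 matrix (task_2_var_1 matrix)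

-- ===== LEMMAS AND PROOFS =====

-- B's per-element step is the product of a col_sums-only step and a best-only step;
-- the best-only step simulates A's (min_value, min_index) step through pvRel.
def pvCsStep (cs : List Int) (jv : Int × Int) : List Int :=
  if jv.1 < (cs.length : Int) then cs.modify jv.1.toNat (· + jv.2) else cs ++ [jv.2]

def pvBestStep (b : Option (Int × Int)) (jv : Int × Int) : Option (Int × Int) :=
  match b with
  | none => some (jv.2, jv.1)
  | some p => if jv.2 < p.1 then some (jv.2, jv.1) else b

def pvRel (s : Option Int × Int) : Option (Int × Int) := s.1.map (fun m => (m, s.2))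

theorem pvBStep_prod (s : List Int × Option (Int × Int)) (jv : Int × Int) :
    pvBStep s jv = (pvCsStep s.1 jv, pvBestStep s.2 jv) := rfl

theorem pvB_inner_prod (l : List (Int × Int)) (s : List Int × Option (Int × Int)) :
    l.foldl pvBStep s = (l.foldl pvCsStep s.1, l.foldl pvBestStep s.2) := by
  induction l generalizing s with
  | nil => rfl
  | cons p l ih =>
    rw [List.foldl_cons, List.foldl_cons, List.foldl_cons, pvBStep_prod]
    exact ih _

theorem pvB_outer_prod (matrix : List (List Int)) (s : List Int × Option (Int × Int)) :
    matrix.foldl (fun s row => (PySem.List.enumerate row 0).foldl pvBStep s) s =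
      (matrix.foldl (fun cs row => (PySem.List.enumerate row 0).foldl pvCsStep cs) s.1,
       matrix.foldl (fun b row => (PySem.List.enumerate row 0).foldl pvBestStep b) s.2) := by
  induction matrix generalizing s with
  | nil => rfl
  | cons r rows ih =>
    rw [List.foldl_cons, List.foldl_cons, List.foldl_cons]
    rw [pvB_inner_prod]
    exact ih _

theorem pvBest_step_rel (s : Option Int × Int) (jv : Int × Int) :
    pvBestStep (pvRel s) jv = pvRel (pvAStep s jv) := by
  rcases h1 : s.1 with _ | m
  · simp [pvRel, pvBestStep, pvAStep, h1]
  · by_cases hlt : jv.2 < m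
    · simp [pvRel, pvBestStep, pvAStep, h1, hlt]
    · simp [pvRel, pvBestStep, pvAStep, h1, hlt]

theorem pvBest_inner_rel (l : List (Int × Int)) (s : Option Int × Int) :
    l.foldl pvBestStep (pvRel s) = pvRel (l.foldl pvAStep s) := by
  induction l generalizing s with
  | nil => rfl
  | cons p l ih =>
    rw [List.foldl_cons, List.foldl_cons, pvBest_step_rel]
    exact ih _

theorem pvBest_outer_rel (matrix : List (List Int)) (s : Option Int × Int) :
    matrix.foldl (fun b row => (PySem.List.enumerate row 0).foldl pvBestStep b) (pvRel s) =
      pvRel (matrix.foldl (fun ms row => (PySem.List.enumerate row 0).foldl pvAStep ms) s) := by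
  induction matrix generalizing s with
  | nil => rfl
  | cons r rows ih =>
    rw [List.foldl_cons, List.foldl_cons, pvBest_inner_rel]
    exact ih _

-- two pointwise-- two pointwise getD facts used by the col_sums characterisation
theorem pv_getD_modify_add (cs : List Int) (k : Nat) (x : Int) (j : Nat) (hk : k < cs.length) :
    (cs.modify k (· + x)).getD j 0 = cs.getD j 0 + (if j = k then x else 0) := by
  rw [List.getD_eq_getElem?_getD, List.getD_eq_getElem?_getD, List.getElem?_modify]
  rcases Nat.lt_or_ge j cs.length with hj | hj
  · rw [List.getElem?_eq_getElem hj]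
    rcases eq_or_ne j k with rfl | h
    · simp
    · simp [h, Ne.symm h]
  · rw [List.getElem?_eq_none hj]
    have : j ≠ k := by omega
    simp [this]

theorem pv_getD_append_one (cs : List Int) (x : Int) (j : Nat) :
    (cs ++ [x]).getD j 0 = cs.getD j 0 + (if j = cs.length then x else 0) := by
  rw [List.getD_eq_getElem?_getD, List.getD_eq_getElem?_getD]
  rcases Nat.lt_trichotomy j cs.length with hj | rfl | hj
  · rw [List.getElem?_append_left hj, List.getElem?_eq_getElem hj]
    have : j ≠ cs.length := by omega
    simp [this]
  · rw [List.getElem?_append_right (le_refl _), List.getElem?_eq_none (le_refl _)]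
    simp
  · rw [List.getElem?_eq_none (by simp; omega), List.getElem?_eq_none (by omega)]
    have : j ≠ cs.length := by omega
    simp [this]

-- getD-level characterisation of one row's col_sums pass, for any start k ≤ |cs|.
theorem pv_if_combine (cs : List Int) (x : Int) (row : List Int) (k j : Nat) :
    cs.getD j 0 + (if j = k then x else 0) + (if k + 1 ≤ j then row.getD (j - (k + 1)) 0 else 0)
      = cs.getD j 0 + (if k ≤ j then (x :: row).getD (j - k) 0 else 0) := by
  rcases Nat.lt_trichotomy j k with h | rfl | h
  · rw [if_neg (by omega), if_neg (by omega), if_neg (by omega)]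
    ring
  · rw [if_pos rfl, if_neg (by omega), if_pos (le_refl _)]
    simp
  · rw [if_neg (by omega), if_pos (by omega), if_pos (by omega),
      show j - k = (j - (k + 1)) + 1 from by omega, List.getD_cons_succ]
    ring

theorem pvCs_inner_getD (row : List Int) (k : Nat) (cs : List Int) (j : Nat)
    (hk : k ≤ cs.length) :
    ((PySem.List.enumerate row (k : Int)).foldl pvCsStep cs).getD j 0 =
      cs.getD j 0 + (if k ≤ j then row.getD (j - k) 0 else 0) := by
  induction row generalizing cs k with
  | nil => simp [PySem.List.enumerate_nil]
  | cons x row ih =>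
    rw [PySem.List.enumerate_cons, List.foldl_cons]
    have hpush : ((k : Int) + 1) = ((k + 1 : Nat) : Int) := by push_cast; ring
    rcases Nat.lt_or_ge k cs.length with hlt | hge
    · have hstep : pvCsStep cs ((k : Int), x) = cs.modify k (· + x) := by
        simp only [pvCsStep]
        rw [if_pos (by exact_mod_cast hlt)]
        simp
      rw [hstep, hpush, ih (k + 1) _ (by simp; omega), pv_getD_modify_add cs k x j hlt]
      exact pv_if_combine cs x row k j
    · have hke : k = cs.length := Nat.le_antisymm hk hge
      have hstep : pvCsStep cs ((k : Int), x) = cs ++ [x] := by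
        simp only [pvCsStep]
        rw [if_neg (by omega)]
      rw [hstep, hpush, ih (k + 1) _ (by simp; omega), pv_getD_append_one, ← hke]
      exact pv_if_combine cs x row k j

-- Column sums over the whole matrix, at the getD level.
theorem pvCs_outer_getD (matrix : List (List Int)) (cs : List Int) (j : Nat) :
    (matrix.foldl (fun cs row => (PySem.List.enumerate row 0).foldl pvCsStep cs) cs).getD j 0 =
      cs.getD j 0 + matrix.foldl (fun a row => a + row.getD j 0) 0 := by
  induction matrix generalizing cs with
  | nil => simp
  | cons r rows ih =>
    rw [List.foldl_cons, List.foldl_cons, ih]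
    have h := pvCs_inner_getD r 0 cs j (Nat.zero_le _)
    rw [if_pos (Nat.zero_le j)] at h
    simp only [Nat.cast_zero, Nat.sub_zero] at h
    rw [h, PySem.List.foldl_add rows (fun row => row.getD j 0),
      PySem.List.foldl_add rows (fun row => row.getD j 0)]
    ring

-- A's min state: once some, stays some; index is ≥ 0 whenever the state is some.
theorem pvA_inner_inv (l : List (Int × Int)) (s : Option Int × Int)
    (hl : ∀ p ∈ l, 0 ≤ p.1) (hs : ∀ m, s.1 = some m → 0 ≤ s.2) :
    ∀ m, (l.foldl pvAStep s).1 = some m → 0 ≤ (l.foldl pvAStep s).2 := by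
  induction l generalizing s with
  | nil => exact hs
  | cons p l ih =>
    rw [List.foldl_cons]
    refine ih _ (fun q hq => hl q (List.mem_cons_of_mem _ hq)) ?_
    have hp : 0 ≤ p.1 := hl p (List.mem_cons_self ..)
    intro m hm
    rcases h1 : s.1 with _ | mv
    · simp only [pvAStep, h1] at hm ⊢
      exact hp
    · by_cases hlt : p.2 < mv
      · simp only [pvAStep, h1, if_pos hlt] at hm ⊢
        exact hp
      · simp only [pvAStep, h1, if_neg hlt] at hm ⊢
        exact hs m (by rw [h1, ← hm])

theorem pvA_outer_inv (matrix : List (List Int)) (s : Option Int × Int)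
    (hs : ∀ m, s.1 = some m → 0 ≤ s.2) :
    ∀ m, ((matrix.foldl (fun ms row => (PySem.List.enumerate row 0).foldl pvAStep ms) s)).1 = some m →
      0 ≤ ((matrix.foldl (fun ms row => (PySem.List.enumerate row 0).foldl pvAStep ms) s)).2 := by
  induction matrix generalizing s with
  | nil => exact hs
  | cons r rows ih =>
    rw [List.foldl_cons]
    refine ih _ ?_
    refine pvA_inner_inv _ _ ?_ hs
    intro p hp
    rw [PySem.List.mem_enumerate_iff] at hp
    obtain ⟨k, hk, rfl⟩ := hp
    simp

-- If A's min state ends as none, no update ever fired: every row is empty.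
theorem pvA_inner_some (l : List (Int × Int)) (s : Option Int × Int) (m : Int)
    (hs : s.1 = some m) : ∃ m', (l.foldl pvAStep s).1 = some m' := by
  induction l generalizing s m with
  | nil => exact ⟨m, hs⟩
  | cons p l ih =>
    rw [List.foldl_cons]
    rcases h1 : s.1 with _ | mv
    · rw [h1] at hs; cases hs
    · by_cases hlt : p.2 < mv
      · exact ih (pvAStep s p) p.2 (by simp only [pvAStep, h1, if_pos hlt])
      · exact ih (pvAStep s p) mv (by simp only [pvAStep, h1, if_neg hlt])

-- some-stability lifted over the remaining rows (used above; forward declaration ordering)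
theorem pvA_inner_some_rows (rows : List (List Int)) (s : Option Int × Int) (m : Int)
    (hs : s.1 = some m) :
    ∃ m', ((rows.foldl (fun ms row => (PySem.List.enumerate row 0).foldl pvAStep ms) s)).1 = some m' := by
  induction rows generalizing s m with
  | nil => exact ⟨m, hs⟩
  | cons r rs ih =>
    rw [List.foldl_cons]
    obtain ⟨m', hm'⟩ := pvA_inner_some (PySem.List.enumerate r 0) s m hs
    exact ih _ _ hm'

theorem pvA_none_all_nil (matrix : List (List Int))
    (h : ((matrix.foldl (fun ms row => (PySem.List.enumerate row 0).foldl pvAStep ms)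
        ((none : Option Int), (-1 : Int)))).1 = none) :
    ∀ row ∈ matrix, row = [] := by
  -- strengthen: from any state, if the fold ends none then each row is empty
  suffices H : ∀ (rows : List (List Int)) (s : Option Int × Int),
      ((rows.foldl (fun ms row => (PySem.List.enumerate row 0).foldl pvAStep ms) s)).1 = none →
      ∀ row ∈ rows, row = [] by
    exact H matrix _ h
  intro rows
  induction rows with
  | nil => intro s _ row hrow; cases hrow
  | cons r rs ih =>
    intro s hnone row hrow
    rw [List.foldl_cons] at hnone
    rcases List.mem_cons.mp hrow with rfl | hmem
    · by_contra hne
      rcases List.exists_cons_of_ne_nil hne with ⟨x, xs, rfl⟩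
      have hsome : ∃ m', (((PySem.List.enumerate (x :: xs) 0).foldl pvAStep s)).1 = some m' := by
        rw [PySem.List.enumerate_cons, List.foldl_cons]
        unfold pvAStep
        rcases h1 : s.1 with _ | mv
        · exact pvA_inner_some _ _ _ rfl
        · by_cases hlt : x < mv
          · simp [hlt]; exact pvA_inner_some _ _ _ rfl
          · simp [hlt]; exact pvA_inner_some _ _ _ h1
      obtain ⟨m', hm'⟩ := hsome
      obtain ⟨m'', hm''⟩ := pvA_inner_some_rows rs _ m' hm'
      rw [hm''] at hnone; cases hnone
    · exact ih _ hnone row hmem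

-- The two ports agree on every input (Pre_ is needed only for faithfulness of the
-- pyGetD/pyGet? renderings of Python's raising indexing, not for this equality).
theorem pv_ports_eq (matrix : List (List Int)) : task_2_var_1 matrix = task_2_var_1_alt matrix := by
  unfold task_2_var_1 task_2_var_1_alt
  rw [pvB_outer_prod]
  have hrel : pvRel ((none : Option Int), (-1 : Int)) = (none : Option (Int × Int)) := rfl
  rw [← hrel, pvBest_outer_rel]
  set ms := matrix.foldl (fun ms row => (PySem.List.enumerate row 0).foldl pvAStep ms)
      ((none : Option Int), (-1 : Int)) with hms
  rcases h1 : ms.1 with _ | mv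
  · -- no element: every row is empty, A's sum is 0
    simp only [pvRel, h1, Option.map_none]
    have hall := pvA_none_all_nil matrix (by rw [← hms]; exact h1)
    have : matrix.foldl (fun acc row => acc + PySem.List.pyGetD row ms.2 0) 0 = 0 := by
      rw [PySem.List.foldl_add]
      have : matrix.map (fun row => PySem.List.pyGetD row ms.2 0) = matrix.map (fun _ => 0) := by
        apply List.map_congr_left
        intro row hrow
        rw [hall row hrow]
        simp [PySem.List.pyGetD, PySem.List.pyGet?, PySem.List.pyIdx?]
      rw [this]
      simp
    simpa using this
  · -- some minimum: min_index ≥ 0; both sides are the j-th column sum (0 beyond a row's end)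
    simp only [pvRel, h1, Option.map_some]
    have hge : 0 ≤ ms.2 := pvA_outer_inv matrix _ (by intro m hm; cases hm) mv (by rw [← hms]; exact h1)
    set j : Nat := ms.2.toNat with hj
    have hcast : (j : Int) = ms.2 := Int.toNat_of_nonneg hge
    rw [PySem.List.pyGet?_of_nonneg _ hge, ← List.getD_eq_getElem?_getD]
    rw [pvCs_outer_getD]
    rw [PySem.List.foldl_add, PySem.List.foldl_add]
    have : matrix.map (fun row => PySem.List.pyGetD row ms.2 0) =
        matrix.map (fun row => row.getD j 0) := by
      apply List.map_congr_left
      intro row _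
      rw [← hcast, PySem.List.pyGetD_natCast]
    rw [this]
    simp only [List.getD_eq_getElem?_getD, hj]
    simp

-- ===== VERDICT (by name: the statement is the Claim_ definition above) =====
theorem task_2_var_1_spec : Claim_equal_task_2_var_1 := by
  intro matrix _ _
  unfold Spec_task_2_var_1
  exact pv_ports_eq matrix
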